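-- pv_equiv track=rewrite | github.com/alumnos-ingcom/python-2-BrunoMayo | src/practica/ejercicio3.py | superposicion
-- ===== SOURCE A (Python) =====
-- def devolver_inicio_superposicion(lista1, lista2):
--     """
--     Esta función toma dos listas y devuelve la posicion en la que se encuentra la primer coincidencia o devuelve un string
--     en caso de que no haya una coincidencia.
--
--     Precondicion: dos listas
--     Poscondicion: una tupla o un string
--     """
--     hay_coincidencia = False
--     if len(lista1) > len(lista2): #Si la longitud de la primer lista es mayor a la segunda
--         i = 0
--         while i < len(lista1): #se recorre la lista mas grande
--             if lista2[0] == lista1[i]: #Se compara el primer caracter de la secuencia mas chica con la mas grande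
--                 contador = (i, 0) #Si hay coincidencia se retorna la posicion de donde coinciden
--                 hay_coincidencia = True
--             else:
--                 pass
--             i = i + 1
--     else: #Si la longitud de la segunda lista es mayor o igual a la de la primera
--         i = 0
--         while i < len(lista2): #Se recorre la lista
--             if lista1[0] == lista2[i]: #Si conincide el primer elemento de la lista1 con alguno de la segunda
--                 contador = (0, i) #Se retorna la posicion donde coinciden
--                 hay_coincidencia = True
--             else:
--                 pass
--             i = i + 1
--
--     if not hay_coincidencia: #Si no hay conincidencia se retorna un mensaje que avisa que no existe coincidencia
--         contador = "No hay coincidencia"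
--
--     return contador
--
-- def superposicion(lista1, lista2):
--     """
--     Esta funcion a partir de la posicion en que coinciden dos listas cuanta la cantidad de veces que se superponen
--     hasta que ya no lo hacen mas.
--
--     Precondicion: dos listas
--     Poscondicion: un string
--     """
--
--
--     if type(devolver_inicio_superposicion(lista1, lista2)) == tuple: #Si la funcion retorna una tupla con el elemento donde coinciden
--         indice_lista1 = devolver_inicio_superposicion(lista1, lista2)[0] #se guarda el elemento de la lista 1 donde coinciden
--         indice_lista2 = devolver_inicio_superposicion(lista1, lista2)[1] #se guarda el elemento de la lista 2 donde coinciden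
--         indice = 0
--         contador = 0
--
--         if len(lista1) > len(lista2): #Si la longitud de la lista1 es mayor a la de la lista2
--             while indice < len(lista2): #Se recorre la lista mas chica
--                 if lista1[indice_lista1 + indice] == lista2[indice_lista2 + indice]: #Partiendo desde las coordenadas donde coinciden se comparan los elementos
--                     contador =  contador + 1 #Si los elementos coinciden se suma 1 al contador
--                 else:# Si no coinciden
--                     break #Se deja de comparar
--                 indice = indice + 1
--         else: #Si la longitud de la lista2 es mayor a la de la lista1
--             while indice < len(lista1): #Se recorre la lista mas chica
--                 if lista1[indice_lista1 + indice] == lista2[indice_lista2 + indice]:#Partiendo desde las coordenadas donde coinciden se comparan los elementos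
--                     contador =  contador + 1#Si los elementos coinciden se suma 1 al contador
--                 else:# Si no coinciden
--                     break#Se deja de comparar
--                 indice = indice + 1
--         #se devuelve un string con el valor del contador y las cordenadas donde comienzan a coincidir
--         resultado = f"Hay {contador} coincidencias y estan el indice {indice_lista1} de la Lista 1 y en el indice {indice_lista2} de la Lista 2"
--     else: #Si la funcion de devolver inicio de superposicion no retorna una tupla
--         resultado = devolver_inicio_superposicion(lista1, lista2) #Se devuelve el string "No hay coincidencia"
--     return  resultado
-- ===== SOURCE B (Python) =====
-- def superposicion(lista1, lista2):
--     # B: one forward pass over the longer list with an online-matching state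
--     # (candidate position, matches so far, still-matching flag); no separate
--     # search phase and no second counting loop.
--     if len(lista1) > len(lista2):
--         corta, larga = lista2, lista1
--     else:
--         corta, larga = lista1, lista2
--     estado = None  # (pos, contador, vivo)
--     for i, v in enumerate(larga):
--         if v == corta[0]:
--             estado = (i, 1, 1 < len(corta))
--         elif estado is not None:
--             pos, cnt, vivo = estado
--             if vivo:
--                 if v == corta[cnt]:
--                     estado = (pos, cnt + 1, cnt + 1 < len(corta))
--                 else:
--                     estado = (pos, cnt, False)
--     if estado is None:
--         return "No hay coincidencia"
--     pos, cnt, _ = estado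
--     if len(lista1) > len(lista2):
--         i1, i2 = pos, 0
--     else:
--         i1, i2 = 0, pos
--     return f"Hay {cnt} coincidencias y estan el indice {i1} de la Lista 1 y en el indice {i2} de la Lista 2"
-- ===== Notes on version B (the rewrite author's own statement) =====
-- stated objective: faster
-- what changed: B replaces A's two staged phases (a full scan that finds the last matching start via a helper called three times, then a second index-arithmetic counting loop) by a single forward pass over the longer list carrying an online-matching state (candidate position, matches so far, still-matching flag) that restarts whenever the shorter list's first element reappears.
-- crash fix: A raises IndexError when the last match lies so close to the longer list's end that its counting loop indexes past the longer list while elements still match; B's single pass simply ends there and returns the count up to the longer list's end. — e.g. on superposicion([1, 2, 1], [1, 2]): A raises IndexError, B returns "Hay 1 coincidencias y estan el indice 2 de la Lista 1 y en el indice 0 de la Lista 2"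
import Mathlib
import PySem

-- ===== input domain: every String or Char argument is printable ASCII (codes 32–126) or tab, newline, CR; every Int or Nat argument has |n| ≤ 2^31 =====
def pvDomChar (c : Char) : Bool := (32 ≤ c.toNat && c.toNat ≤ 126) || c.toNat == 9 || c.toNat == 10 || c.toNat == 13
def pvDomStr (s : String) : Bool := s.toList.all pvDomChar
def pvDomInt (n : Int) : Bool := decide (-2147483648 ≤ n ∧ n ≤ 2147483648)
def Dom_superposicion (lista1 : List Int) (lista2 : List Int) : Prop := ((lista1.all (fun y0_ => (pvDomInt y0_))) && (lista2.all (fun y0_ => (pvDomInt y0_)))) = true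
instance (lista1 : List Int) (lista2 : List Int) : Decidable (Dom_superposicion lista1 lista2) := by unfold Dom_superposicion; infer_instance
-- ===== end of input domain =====

-- B replaces A's two staged scans (find-last-start, then count) by one forward pass with an
-- online-matching state (objective: faster by a constant factor, measured;
-- equivalence is about the return value).

-- ===== PORT A =====
-- helper devolver_inicio_superposicion: full forward scan, later matches overwrite earlier
-- ones.  The Python loop counter i is always ≥ 0 and < len, so list[i] is exactly List.getD;
-- list[0] on an empty list would raise IndexError in Python — those inputs are outside Pre_,
-- the getD default is unreachable there.
def devolverInicio (lista1 lista2 : List Int) : Option (Nat × Nat) :=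
  if lista1.length > lista2.length then
    (List.range lista1.length).foldl
      (fun contador i => if lista2.getD 0 0 = lista1.getD i 0 then some (i, 0) else contador)
      none
  else
    (List.range lista2.length).foldl
      (fun contador i => if lista1.getD 0 0 = lista2.getD i 0 then some (0, i) else contador)
      none

-- A's counting while-loop; fuel counts the remaining iterations of 'indice < len(shorter)'.
-- Out-of-range access here is Python's IndexError — outside Pre_, default unreachable.
def contarA (lista1 lista2 : List Int) (i1 i2 : Nat) : Nat → Nat → Int → Int
  | 0, _, contador => contador
  | fuel + 1, indice, contador =>
    if lista1.getD (i1 + indice) 0 = lista2.getD (i2 + indice) 0 then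
      contarA lista1 lista2 i1 i2 fuel (indice + 1) (contador + 1)
    else contador

def superposicion (lista1 : List Int) (lista2 : List Int) : String :=
  match devolverInicio lista1 lista2 with
  | some (indice_lista1, indice_lista2) =>
    let contador :=
      if lista1.length > lista2.length then
        contarA lista1 lista2 indice_lista1 indice_lista2 lista2.length 0 0
      else
        contarA lista1 lista2 indice_lista1 indice_lista2 lista1.length 0 0
    "Hay " ++ PySem.Int.toStr contador ++ " coincidencias y estan el indice " ++
      PySem.Int.toStr indice_lista1 ++ " de la Lista 1 y en el indice " ++
      PySem.Int.toStr indice_lista2 ++ " de la Lista 2"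
  | none => "No hay coincidencia"

-- ===== PORT B =====
-- Source B's loop body: restart the candidate on corta[0], else advance/kill the current run.
-- corta[0] / corta[cnt] are only read in-range inside Pre_ (corta[cnt] only when vivo,
-- which guarantees cnt < len(corta)); corta[0] on an empty corta raises in Python — outside Pre_.
def pasoB (corta : List Int) (st : Option (Int × Nat × Bool)) (iv : Int × Int) :
    Option (Int × Nat × Bool) :=
  if iv.2 = corta.getD 0 0 then some (iv.1, 1, decide (1 < corta.length))
  else
    match st with
    | none => none
    | some (pos, cnt, vivo) =>
      if vivo then
        if iv.2 = corta.getD cnt 0 then some (pos, cnt + 1, decide (cnt + 1 < corta.length))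
        else some (pos, cnt, false)
      else some (pos, cnt, vivo)

def superposicion_alt (lista1 : List Int) (lista2 : List Int) : String :=
  let corta := if lista1.length > lista2.length then lista2 else lista1
  let larga := if lista1.length > lista2.length then lista1 else lista2
  match (PySem.List.enumerate larga).foldl (pasoB corta) none with
  | none => "No hay coincidencia"
  | some (pos, cnt, _) =>
    let i1 : Int := if lista1.length > lista2.length then pos else 0
    let i2 : Int := if lista1.length > lista2.length then 0 else pos
    "Hay " ++ PySem.Int.toStr (cnt : Int) ++ " coincidencias y estan el indice " ++
      PySem.Int.toStr i1 ++ " de la Lista 1 y en el indice " ++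
      PySem.Int.toStr i2 ++ " de la Lista 2"

-- ===== PRECONDITION & SPEC =====
-- Pre_ excludes exactly the inputs on which Python A raises IndexError: a nonempty longer
-- list with an empty shorter list, or a last match so close to the longer list's end that
-- A's counting loop runs past the longer list while all compared elements are equal.
def Pre_superposicion (lista1 : List Int) (lista2 : List Int) : Prop :=
  (lista1.length > lista2.length →
    lista2 ≠ [] ∧
    ∀ p < lista1.length,
      (lista1.getD p 0 = lista2.getD 0 0 ∧
        ∀ q < lista1.length, p < q → lista1.getD q 0 ≠ lista2.getD 0 0) →
      ¬(lista1.length - p < lista2.length ∧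
         ∀ j < lista1.length - p, lista1.getD (p + j) 0 = lista2.getD j 0)) ∧
  (lista1.length ≤ lista2.length → lista2 ≠ [] →
    lista1 ≠ [] ∧
    ∀ p < lista2.length,
      (lista2.getD p 0 = lista1.getD 0 0 ∧
        ∀ q < lista2.length, p < q → lista2.getD q 0 ≠ lista1.getD 0 0) →
      ¬(lista2.length - p < lista1.length ∧
         ∀ j < lista2.length - p, lista1.getD j 0 = lista2.getD (p + j) 0))
instance (lista1 : List Int) (lista2 : List Int) : Decidable (Pre_superposicion lista1 lista2) := by
  unfold Pre_superposicion
  haveI B1 : Decidable (∀ p < lista1.length,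
      (lista1.getD p 0 = lista2.getD 0 0 ∧
        ∀ q < lista1.length, p < q → lista1.getD q 0 ≠ lista2.getD 0 0) →
      ¬(lista1.length - p < lista2.length ∧
         ∀ j < lista1.length - p, lista1.getD (p + j) 0 = lista2.getD j 0)) :=
    Nat.decidableBallLT _ _
  haveI B2 : Decidable (∀ p < lista2.length,
      (lista2.getD p 0 = lista1.getD 0 0 ∧
        ∀ q < lista2.length, p < q → lista2.getD q 0 ≠ lista1.getD 0 0) →
      ¬(lista2.length - p < lista1.length ∧
         ∀ j < lista2.length - p, lista1.getD j 0 = lista2.getD (p + j) 0)) :=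
    Nat.decidableBallLT _ _
  infer_instance

def pvWitness_superposicion : List Int × List Int := ([1, 2, 3], [2, 3])

-- A raises IndexError when the last match sits so close to the longer list's end that the
-- counting loop runs off it while still matching; B returns the truncated count there.
def Raises_superposicion (lista1 : List Int) (lista2 : List Int) : Prop :=
  (lista1.length > lista2.length ∧ lista2 ≠ [] ∧
    ∃ p, p < lista1.length ∧ lista1.getD p 0 = lista2.getD 0 0 ∧
      (∀ q < lista1.length, p < q → lista1.getD q 0 ≠ lista2.getD 0 0) ∧
      lista1.length - p < lista2.length ∧
      ∀ j < lista1.length - p, lista1.getD (p + j) 0 = lista2.getD j 0) ∨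
  (lista1.length ≤ lista2.length ∧ lista1 ≠ [] ∧
    ∃ p, p < lista2.length ∧ lista2.getD p 0 = lista1.getD 0 0 ∧
      (∀ q < lista2.length, p < q → lista2.getD q 0 ≠ lista1.getD 0 0) ∧
      lista2.length - p < lista1.length ∧
      ∀ j < lista2.length - p, lista1.getD j 0 = lista2.getD (p + j) 0)
instance (lista1 : List Int) (lista2 : List Int) : Decidable (Raises_superposicion lista1 lista2) := by unfold Raises_superposicion; infer_instance

def pvRaiseWitness_superposicion : List Int × List Int := ([1, 2, 1], [1, 2])
def pvRaiseWitnessOut_superposicion : String :=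
  "Hay 1 coincidencias y estan el indice 2 de la Lista 1 y en el indice 0 de la Lista 2"

def Spec_superposicion (lista1 : List Int) (lista2 : List Int) (out : String) : Prop := out = superposicion_alt lista1 lista2
instance (lista1 : List Int) (lista2 : List Int) (out : String) : Decidable (Spec_superposicion lista1 lista2 out) := by unfold Spec_superposicion; infer_instance

-- ===== CLAIM (what is proved, stated in full; the proofs are below) =====
def Claim_equal_superposicion : Prop := ∀ (lista1 : List Int) (lista2 : List Int), Dom_superposicion lista1 lista2 → Pre_superposicion lista1 lista2 → Spec_superposicion lista1 lista2 (superposicion lista1 lista2)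
def Claim_raises_superposicion : Prop := (∀ (lista1 : List Int) (lista2 : List Int), Dom_superposicion lista1 lista2 → Raises_superposicion lista1 lista2 → ¬ Pre_superposicion lista1 lista2) ∧ (Dom_superposicion (pvRaiseWitness_superposicion.1) (pvRaiseWitness_superposicion.2) ∧ Raises_superposicion (pvRaiseWitness_superposicion.1) (pvRaiseWitness_superposicion.2) ∧ superposicion_alt (pvRaiseWitness_superposicion.1) (pvRaiseWitness_superposicion.2) = pvRaiseWitnessOut_superposicion)

-- ===== LEMMAS AND PROOFS =====

-- proof-only: last index p < n with l[p] = t, scanning downward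
def buscarUltimo (l : List Int) (t : Int) : Nat → Option Nat
  | 0 => none
  | i + 1 => if l.getD i 0 = t then some i else buscarUltimo l t i

-- proof-only: length of the longest common prefix
def lcp : List Int → List Int → Nat
  | x :: xs, y :: ys => if x = y then lcp xs ys + 1 else 0
  | _, _ => 0

-- proof-only normal form of A's counting loop: both lists pre-dropped to the loop's start
def contarD : List Int → List Int → Nat → Int → Int
  | _, _, 0, c => c
  | xs, ys, fuel + 1, c =>
    if xs.getD 0 0 = ys.getD 0 0 then contarD xs.tail ys.tail fuel (c + 1) else c

-- proof-only closed form of B's fold state after n steps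
def estadoSpec (corta larga : List Int) (n : Nat) : Option (Int × Nat × Bool) :=
  (buscarUltimo larga (corta.getD 0 0) n).map (fun (p : Nat) =>
    ((p : Int), lcp corta ((larga.drop p).take (n - p)),
      decide (lcp corta ((larga.drop p).take (n - p)) < corta.length ∧
              lcp corta ((larga.drop p).take (n - p)) = n - p)))

lemma getD_drop (l : List Int) (n j : Nat) (d : Int) :
    (l.drop n).getD j d = l.getD (n + j) d := by
  simp [List.getD_eq_getElem?_getD, List.getElem?_drop]

lemma foldl_find_map (l : List Int) (t : Int) (f : Nat → Nat × Nat) :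
    ∀ (n : Nat) (a : Option Nat),
      (List.range n).foldl (fun acc i => if t = l.getD i 0 then some (f i) else acc) (a.map f)
        = ((List.range n).foldl (fun acc i => if t = l.getD i 0 then some i else acc) a).map f := by
  intro n
  induction n with
  | zero => intro a; simp
  | succ n ih =>
    intro a
    rw [List.range_succ, List.foldl_append, List.foldl_append, ih]
    show (if t = l.getD n 0 then some (f n) else _) = Option.map f (if t = l.getD n 0 then some n else _)
    by_cases h : t = l.getD n 0
    · rw [if_pos h, if_pos h]; rfl
    · rw [if_neg h, if_neg h]

lemma find_eq (l : List Int) (t : Int) : ∀ n,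
    (List.range n).foldl (fun acc i => if t = l.getD i 0 then some i else acc) none
      = buscarUltimo l t n := by
  intro n
  induction n with
  | zero => simp [buscarUltimo]
  | succ n ih =>
    rw [List.range_succ, List.foldl_append, ih]
    show (if t = l.getD n 0 then some n else buscarUltimo l t n)
        = if l.getD n 0 = t then some n else buscarUltimo l t n
    by_cases h : l.getD n 0 = t
    · rw [if_pos h.symm, if_pos h]
    · rw [if_neg (fun hh => h hh.symm), if_neg h]

lemma buscar_spec (l : List Int) (t : Int) : ∀ n p, buscarUltimo l t n = some p →
    p < n ∧ l.getD p 0 = t ∧ ∀ q < n, p < q → l.getD q 0 ≠ t := by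
  intro n
  induction n with
  | zero => intro p h; simp [buscarUltimo] at h
  | succ n ih =>
    intro p h
    have h' : (if l.getD n 0 = t then some n else buscarUltimo l t n) = some p := h
    by_cases hm : l.getD n 0 = t
    · rw [if_pos hm] at h'
      have hpn : n = p := Option.some.inj h'
      subst hpn
      exact ⟨Nat.lt_succ_self _, hm, fun q hq hpq => by omega⟩
    · rw [if_neg hm] at h'
      obtain ⟨h1, h2, h3⟩ := ih p h'
      refine ⟨by omega, h2, fun q hq hpq => ?_⟩
      rcases Nat.lt_succ_iff_lt_or_eq.mp hq with hq' | rfl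
      · exact h3 q hq' hpq
      · exact hm

lemma contarA_shift (l1 l2 : List Int) (i1 i2 : Nat) :
    ∀ fuel indice c, contarA l1 l2 i1 i2 fuel indice c
      = contarD (l1.drop (i1 + indice)) (l2.drop (i2 + indice)) fuel c := by
  intro fuel
  induction fuel with
  | zero => intro indice c; rfl
  | succ fuel ih =>
    intro indice c
    rw [contarD]
    simp only [getD_drop, Nat.add_zero, List.tail_drop]
    show (if l1.getD (i1 + indice) 0 = l2.getD (i2 + indice) 0 then
            contarA l1 l2 i1 i2 fuel (indice + 1) (c + 1) else c)
        = if l1.getD (i1 + indice) 0 = l2.getD (i2 + indice) 0 then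
            contarD (l1.drop (i1 + indice + 1)) (l2.drop (i2 + indice + 1)) fuel (c + 1) else c
    by_cases h : l1.getD (i1 + indice) 0 = l2.getD (i2 + indice) 0
    · rw [if_pos h, if_pos h]; exact ih (indice + 1) (c + 1)
    · rw [if_neg h, if_neg h]

lemma contarD_comm : ∀ (fuel : Nat) (xs ys : List Int) (c : Int),
    contarD xs ys fuel c = contarD ys xs fuel c := by
  intro fuel
  induction fuel with
  | zero => intro xs ys c; rfl
  | succ fuel ih =>
    intro xs ys c
    rw [contarD, contarD]
    by_cases h : xs.getD 0 0 = ys.getD 0 0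
    · rw [if_pos h, if_pos h.symm, ih]
    · rw [if_neg h, if_neg (fun hh => h hh.symm)]

lemma lcp_le_left : ∀ (t w : List Int), lcp t w ≤ t.length := by
  intro t
  induction t with
  | nil => intro w; cases w <;> simp [lcp]
  | cons a t ih =>
    intro w
    cases w with
    | nil => simp [lcp]
    | cons y w =>
      rw [lcp]
      by_cases h : a = y
      · rw [if_pos h]; have := ih w; simp; omega
      · rw [if_neg h]; simp

lemma lcp_le_right : ∀ (w t : List Int), lcp t w ≤ w.length := by
  intro w
  induction w with
  | nil => intro t; cases t <;> simp [lcp]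
  | cons y w ih =>
    intro t
    cases t with
    | nil => simp [lcp]
    | cons a t =>
      rw [lcp]
      by_cases h : a = y
      · rw [if_pos h]; have := ih t; simp; omega
      · rw [if_neg h]; simp

lemma lcp_append_full : ∀ (w t : List Int) (v : Int), lcp t w = w.length → w.length < t.length →
    lcp t (w ++ [v]) = if t.getD w.length 0 = v then w.length + 1 else w.length := by
  intro w
  induction w with
  | nil =>
    intro t v _ hlt
    cases t with
    | nil => simp at hlt
    | cons a t =>
      show lcp (a :: t) [v] = _
      rw [lcp]
      by_cases h : a = v
      · rw [if_pos h]
        simp [lcp, List.getD, h]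
      · rw [if_neg h]
        simp [List.getD]
        omega
  | cons y w ih =>
    intro t v hfull hlt
    cases t with
    | nil => simp at hlt
    | cons a t =>
      rw [lcp] at hfull
      by_cases h : a = y
      · rw [if_pos h] at hfull
        have hfull' : lcp t w = w.length := by simp at hfull; omega
        have hlt' : w.length < t.length := by simp at hlt; omega
        show lcp (a :: t) (y :: (w ++ [v])) = _
        rw [lcp, if_pos h, ih t v hfull' hlt']
        simp only [List.length_cons, List.getD_cons_succ]
        by_cases hh : t.getD w.length 0 = v
        · rw [if_pos hh, if_pos hh]
        · rw [if_neg hh, if_neg hh]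
      · rw [if_neg h] at hfull
        simp at hfull

lemma lcp_append_stable : ∀ (w t : List Int) (v : Int),
    (lcp t w < w.length ∨ lcp t w = t.length) → lcp t (w ++ [v]) = lcp t w := by
  intro w
  induction w with
  | nil =>
    intro t v h
    rcases h with h | h
    · simp at h
    · cases t with
      | nil => simp [lcp]
      | cons a t =>
        exfalso
        have : lcp (a :: t) [] = 0 := by simp [lcp]
        rw [this] at h; simp at h
  | cons y w ih =>
    intro t v h
    cases t with
    | nil => simp [lcp]
    | cons a t =>
      show lcp (a :: t) (y :: (w ++ [v])) = lcp (a :: t) (y :: w)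
      rw [lcp, lcp]
      by_cases hay : a = y
      · rw [if_pos hay, if_pos hay]
        have h' : lcp t w < w.length ∨ lcp t w = t.length := by
          rcases h with h | h
          · left
            have : lcp (a :: t) (y :: w) = lcp t w + 1 := by rw [lcp, if_pos hay]
            rw [this] at h; simp at h; omega
          · right
            have : lcp (a :: t) (y :: w) = lcp t w + 1 := by rw [lcp, if_pos hay]
            rw [this] at h; simp at h; omega
        rw [ih t v h']
      · rw [if_neg hay, if_neg hay]

lemma contarD_eq_lcp : ∀ (ys xs : List Int) (c : Int),
    ¬(xs.length < ys.length ∧ ∀ j < xs.length, xs.getD j 0 = ys.getD j 0) →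
    contarD xs ys ys.length c = c + (lcp ys xs : Int) := by
  intro ys
  induction ys with
  | nil => intro xs c _; cases xs <;> simp [contarD, lcp]
  | cons y ys ih =>
    intro xs c h
    cases xs with
    | nil =>
      exact absurd ⟨by simp, fun j hj => by simp at hj⟩ h
    | cons x xs' =>
      show contarD (x :: xs') (y :: ys) (ys.length + 1) c = _
      rw [contarD]
      simp only [List.getD_cons_zero, List.tail_cons]
      by_cases hxy : x = y
      · rw [if_pos hxy]
        have h' : ¬(xs'.length < ys.length ∧ ∀ j < xs'.length, xs'.getD j 0 = ys.getD j 0) := by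
          intro ⟨hlen, heq⟩
          refine h ⟨by simpa using hlen, fun j hj => ?_⟩
          cases j with
          | zero => simpa using hxy
          | succ k =>
            simp only [List.getD_cons_succ]
            exact heq k (by simpa using hj)
        rw [ih xs' (c + 1) h', lcp, if_pos hxy.symm]
        push_cast
        ring
      · rw [if_neg hxy, lcp, if_neg (fun hh : y = x => hxy hh.symm)]
        simp


lemma lcp_nil : ∀ (t : List Int), lcp t [] = 0 := by
  intro t; cases t <;> simp [lcp]

lemma window_succ (l : List Int) (p n : Nat) (_hp : p ≤ n) (hn : n < l.length) :
    (l.drop p).take (n + 1 - p) = (l.drop p).take (n - p) ++ [l.getD n 0] := by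
  have h1 : n + 1 - p = (n - p) + 1 := by omega
  rw [h1, List.take_add_one]
  have h2 : (l.drop p)[n - p]? = some (l.getD n 0) := by
    rw [List.getElem?_drop]
    have h3 : p + (n - p) = n := by omega
    rw [h3]
    simp [List.getD_eq_getElem?_getD, List.getElem?_eq_getElem hn]
  rw [h2]
  rfl

lemma window_len (l : List Int) (p n : Nat) (hp : p ≤ n) (hn : n ≤ l.length) :
    ((l.drop p).take (n - p)).length = n - p := by
  simp
  omega

lemma pasoB_spec (corta larga : List Int) (hc : corta ≠ []) (n : Nat) (hn : n < larga.length) :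
    pasoB corta (estadoSpec corta larga n) ((n : Int), larga.getD n 0)
      = estadoSpec corta larga (n + 1) := by
  obtain ⟨c, ct, rfl⟩ : ∃ c ct, corta = c :: ct := by
    cases corta with
    | nil => exact absurd rfl hc
    | cons c ct => exact ⟨c, ct, rfl⟩
  have hbs : buscarUltimo larga ((c :: ct).getD 0 0) (n + 1)
      = if larga.getD n 0 = (c :: ct).getD 0 0 then some n
        else buscarUltimo larga ((c :: ct).getD 0 0) n := rfl
  by_cases hv : larga.getD n 0 = (c :: ct).getD 0 0
  · -- restart on corta[0]
    have hW : (larga.drop n).take (n + 1 - n) = [larga.getD n 0] := by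
      have := window_succ larga n n le_rfl hn
      simpa using this
    have hlcp : lcp (c :: ct) ((larga.drop n).take (n + 1 - n)) = 1 := by
      rw [hW]
      have hvc : larga.getD n 0 = c := hv
      rw [hvc, lcp, if_pos rfl, lcp_nil]
    unfold estadoSpec
    rw [hbs, if_pos hv]
    show pasoB (c :: ct) _ _ = _
    simp only [pasoB]
    rw [if_pos hv]
    simp only [Option.map_some, hlcp]
    have h1 : n + 1 - n = 1 := by omega
    congr 1
    refine Prod.ext rfl (Prod.ext rfl ?_)
    simp [h1]
  · -- no restart
    unfold estadoSpec
    rw [hbs, if_neg hv]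
    cases hb : buscarUltimo larga ((c :: ct).getD 0 0) n with
    | none =>
      simp only [pasoB]
      rw [if_neg hv]
      simp
    | some p =>
      obtain ⟨hpn, hpm, _⟩ := buscar_spec larga ((c :: ct).getD 0 0) n p hb
      have hple : p ≤ n := by omega
      set W := (larga.drop p).take (n - p) with hWdef
      have hlenW : W.length = n - p := window_len larga p n hple (by omega)
      have hW' : (larga.drop p).take (n + 1 - p) = W ++ [larga.getD n 0] :=
        window_succ larga p n hple hn
      set cnt := lcp (c :: ct) W with hcnt
      simp only [pasoB]
      rw [if_neg hv]
      simp only [Option.map_some, hW']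
      by_cases halive : cnt < (c :: ct).length ∧ cnt = n - p
      · have hfull : lcp (c :: ct) W = W.length := by rw [hlenW]; exact halive.2
        have hlt : W.length < (c :: ct).length := by rw [hlenW]; omega
        have hstep := lcp_append_full W (c :: ct) (larga.getD n 0) hfull hlt
        have hdec : decide (cnt < (c :: ct).length ∧ cnt = n - p) = true :=
          decide_eq_true halive
        show (if (decide (cnt < (c :: ct).length ∧ cnt = n - p)) = true then _ else _) = _
        rw [hdec]
        simp only [if_true]
        by_cases hm : larga.getD n 0 = (c :: ct).getD cnt 0
        · rw [if_pos hm]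
          have hcond : (c :: ct).getD W.length 0 = larga.getD n 0 := by
            rw [hlenW, ← halive.2]; exact hm.symm
          have hcnt' : lcp (c :: ct) (W ++ [larga.getD n 0]) = cnt + 1 := by
            rw [hstep, if_pos hcond, hlenW]
            omega
          rw [hcnt']
          have h4 : decide (cnt + 1 < (c :: ct).length)
              = decide (cnt + 1 < (c :: ct).length ∧ cnt + 1 = n + 1 - p) :=
            decide_eq_decide.mpr ⟨fun h => ⟨h, by omega⟩, fun h => h.1⟩
          rw [h4]
        · rw [if_neg hm]
          have hcond : ¬ ((c :: ct).getD W.length 0 = larga.getD n 0) := by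
            rw [hlenW, ← halive.2]; exact fun h => hm h.symm
          have hcnt' : lcp (c :: ct) (W ++ [larga.getD n 0]) = cnt := by
            rw [hstep, if_neg hcond, hlenW]
            omega
          rw [hcnt']
          have h4 : decide (cnt < (c :: ct).length ∧ cnt = n + 1 - p) = false :=
            decide_eq_false (by intro ⟨_, h⟩; omega)
          rw [h4]
      · have hle1 : cnt ≤ (c :: ct).length := lcp_le_left _ _
        have hle2 : cnt ≤ n - p := by rw [hcnt, ← hlenW]; exact lcp_le_right _ _
        have hstable : lcp (c :: ct) (W ++ [larga.getD n 0]) = cnt := by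
          apply lcp_append_stable
          by_cases hcap : cnt = (c :: ct).length
          · right; exact hcap
          · left; rw [hlenW]; omega
        have hdec : decide (cnt < (c :: ct).length ∧ cnt = n - p) = false :=
          decide_eq_false halive
        show (if (decide (cnt < (c :: ct).length ∧ cnt = n - p)) = true then _ else _) = _
        rw [hdec]
        simp only [Bool.false_eq_true, if_false]
        rw [hstable]
        have h2 : ¬ (cnt < (c :: ct).length ∧ cnt = n + 1 - p) := by
          intro ⟨h3, h4⟩
          by_cases hcap : cnt = (c :: ct).length
          · omega
          · have h5 : cnt < n - p ∨ cnt = n - p := by omega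
            rcases h5 with h | h
            · omega
            · exact halive ⟨h3, h⟩
        have h4 : decide (cnt < (c :: ct).length ∧ cnt = n + 1 - p) = false :=
          decide_eq_false h2
        rw [h4]

lemma fold_take (corta larga : List Int) (hc : corta ≠ []) :
    ∀ n, n ≤ larga.length →
      (PySem.List.enumerate (larga.take n)).foldl (pasoB corta) none
        = estadoSpec corta larga n := by
  intro n
  induction n with
  | zero =>
    intro _
    simp [estadoSpec, buscarUltimo]
  | succ n ih =>
    intro hle
    have hn : n < larga.length := by omega
    have ht : larga.take (n + 1) = larga.take n ++ [larga.getD n 0] := by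
      rw [List.take_add_one]
      simp [List.getD_eq_getElem?_getD, List.getElem?_eq_getElem hn]
    have hlen : (larga.take n).length = n := by simp; omega
    rw [ht, PySem.List.enumerate_append, List.foldl_append, ih (by omega), hlen]
    have hsingle : PySem.List.enumerate [larga.getD n 0] ((0 : Int) + (n : Nat))
        = [((n : Int), larga.getD n 0)] := by
      simp [PySem.List.enumerate_cons, PySem.List.enumerate_nil]
    rw [hsingle]
    exact pasoB_spec corta larga hc n hn

lemma fold_full (corta larga : List Int) (hc : corta ≠ []) :
    (PySem.List.enumerate larga).foldl (pasoB corta) none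
      = estadoSpec corta larga larga.length := by
  have := fold_take corta larga hc larga.length le_rfl
  rwa [List.take_length] at this

lemma window_full (l : List Int) (p : Nat) :
    (l.drop p).take (l.length - p) = l.drop p := by
  rw [← List.length_drop]
  exact List.take_length

theorem superposicion_spec : Claim_equal_superposicion := by
  intro l1 l2 _ hpre
  show superposicion l1 l2 = superposicion_alt l1 l2
  by_cases hgt : l1.length > l2.length
  · have hc2 : l2 ≠ [] := (hpre.1 hgt).1
    have hdev : devolverInicio l1 l2
        = (buscarUltimo l1 (l2.getD 0 0) l1.length).map (fun i => (i, 0)) := by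
      unfold devolverInicio
      rw [if_pos hgt, ← find_eq]
      have h0 := foldl_find_map l1 (l2.getD 0 0) (fun i => (i, 0)) l1.length none
      simpa using h0
    have hfold := fold_full l2 l1 hc2
    cases hb : buscarUltimo l1 (l2.getD 0 0) l1.length with
    | none =>
      simp only [superposicion, superposicion_alt, hdev, hb, Option.map_none, if_pos hgt,
        hfold, estadoSpec]
    | some p =>
      obtain ⟨hp, hm, hl⟩ := buscar_spec l1 (l2.getD 0 0) l1.length p hb
      have hyp : ¬((l1.drop p).length < l2.length ∧
          ∀ j < (l1.drop p).length, (l1.drop p).getD j 0 = l2.getD j 0) := by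
        intro ⟨h1, h2⟩
        refine (hpre.1 hgt).2 p hp ⟨hm, hl⟩ ⟨by simpa using h1, fun j hj => ?_⟩
        have h3 := h2 j (by simpa using hj)
        rwa [getD_drop] at h3
      have hcA : contarA l1 l2 p 0 l2.length 0 0 = ((lcp l2 (l1.drop p) : Nat) : Int) := by
        rw [contarA_shift, Nat.add_zero, Nat.add_zero, List.drop_zero]
        have h5 := contarD_eq_lcp l2 (l1.drop p) 0 hyp
        simpa using h5
      simp only [superposicion, superposicion_alt, hdev, hb, Option.map_some, if_pos hgt,
        hfold, estadoSpec, window_full, hcA, Nat.cast_zero]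
  · rw [not_lt] at hgt
    have hngt : ¬ (l1.length > l2.length) := by omega
    by_cases hl2 : l2 = []
    · have hl1 : l1 = [] := by
        have := List.length_eq_zero_iff.mp (by rw [hl2] at hgt; simpa using hgt)
        exact this
      subst hl1; subst hl2
      decide
    · have hc1 : l1 ≠ [] := (hpre.2 hgt hl2).1
      have hdev : devolverInicio l1 l2
          = (buscarUltimo l2 (l1.getD 0 0) l2.length).map (fun i => ((0 : Nat), i)) := by
        unfold devolverInicio
        rw [if_neg hngt, ← find_eq]
        have h0 := foldl_find_map l2 (l1.getD 0 0) (fun i => ((0 : Nat), i)) l2.length none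
        simpa using h0
      have hfold := fold_full l1 l2 hc1
      cases hb : buscarUltimo l2 (l1.getD 0 0) l2.length with
      | none =>
        simp only [superposicion, superposicion_alt, hdev, hb, Option.map_none, if_neg hngt,
          hfold, estadoSpec]
      | some p =>
        obtain ⟨hp, hm, hl⟩ := buscar_spec l2 (l1.getD 0 0) l2.length p hb
        have hyp : ¬((l2.drop p).length < l1.length ∧
            ∀ j < (l2.drop p).length, (l2.drop p).getD j 0 = l1.getD j 0) := by
          intro ⟨h1, h2⟩
          refine (hpre.2 hgt hl2).2 p hp ⟨hm, hl⟩ ⟨by simpa using h1, fun j hj => ?_⟩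
          have h3 := h2 j (by simpa using hj)
          rw [getD_drop] at h3
          exact h3.symm
        have hcA : contarA l1 l2 0 p l1.length 0 0 = ((lcp l1 (l2.drop p) : Nat) : Int) := by
          rw [contarA_shift, Nat.add_zero, Nat.add_zero, List.drop_zero, contarD_comm]
          have h5 := contarD_eq_lcp l1 (l2.drop p) 0 hyp
          simpa using h5
        simp only [superposicion, superposicion_alt, hdev, hb, Option.map_some, if_neg hngt,
          hfold, estadoSpec, window_full, hcA, Nat.cast_zero]

@[simp]
theorem superposicion_raises : Claim_raises_superposicion := by
  unfold Claim_raises_superposicion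
  constructor
  · intro l1 l2 _ hr hpre
    rcases hr with ⟨hgt, _, p, hp, hm, hl, hov1, hov2⟩ | ⟨hle, _, p, hp, hm, hl, hov1, hov2⟩
    · exact (hpre.1 hgt).2 p hp ⟨hm, hl⟩ ⟨hov1, hov2⟩
    · have hne2 : l2 ≠ [] := by intro h; rw [h] at hp; simp at hp
      exact (hpre.2 hle hne2).2 p hp ⟨hm, hl⟩ ⟨hov1, hov2⟩
  · exact ⟨by decide, by decide, by decide⟩
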